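-- pv_equiv track=rewrite | github.com/novasolve/ci-auto-rescue | examples/demos/demo_file_io/file_io.py | _collect_fieldnames_from_rows
-- ===== SOURCE A (Python) =====
-- from typing import Any, Dict, Iterable, List, Mapping, Optional, Sequence, Union
--
-- def _collect_fieldnames_from_rows(
--     rows: Iterable[Mapping[str, Any]],
--     explicit_fieldnames: Optional[Sequence[str]] = None,
-- ) -> List[str]:
--     """
--     Determine fieldnames for CSV writing.
--
--     - If explicit_fieldnames are provided, they are used as-is.
--     - Otherwise, fieldnames are collected in insertion order from the rows.
--     """
--     if explicit_fieldnames is not None: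
--         return list(explicit_fieldnames)
--
--     ordered: List[str] = []
--     seen = set()
--     for row in rows:
--         for key in row.keys():
--             if key not in seen:
--                 seen.add(key)
--                 ordered.append(key)
--     return ordered
-- ===== SOURCE B (Python) =====
-- from typing import Any, Iterable, List, Mapping, Optional, Sequence
--
-- def _collect_fieldnames_from_rows(
--     rows: Iterable[Mapping[str, Any]],
--     explicit_fieldnames: Optional[Sequence[str]] = None,
-- ) -> List[str]:
--     if explicit_fieldnames is not None:
--         return list(explicit_fieldnames)
--     # Stage 1: flatten every key of every row into one list (duplicates kept).
--     keys = [key for row in rows for key in row.keys()]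
--     # Stage 2: walk the positions backwards, overwriting, so that `first`
--     # ends up holding each key's FIRST index (no membership test needed).
--     first = {}
--     for i, key in reversed(list(enumerate(keys))):
--         first[key] = i
--     # Stage 3: keep exactly the positions that are first occurrences.
--     return [key for i, key in enumerate(keys) if first[key] == i]
-- ===== Notes on version B (the rewrite author's own statement) =====
-- stated objective: alternative
-- what changed: A's single forward pass with a seen-set and conditional append is replaced by three staged passes with no membership test: flatten all row keys, walk the enumerated positions backwards overwriting a dict so it holds each key's first index, then keep exactly the positions equal to their key's first index.
import Mathlib
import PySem

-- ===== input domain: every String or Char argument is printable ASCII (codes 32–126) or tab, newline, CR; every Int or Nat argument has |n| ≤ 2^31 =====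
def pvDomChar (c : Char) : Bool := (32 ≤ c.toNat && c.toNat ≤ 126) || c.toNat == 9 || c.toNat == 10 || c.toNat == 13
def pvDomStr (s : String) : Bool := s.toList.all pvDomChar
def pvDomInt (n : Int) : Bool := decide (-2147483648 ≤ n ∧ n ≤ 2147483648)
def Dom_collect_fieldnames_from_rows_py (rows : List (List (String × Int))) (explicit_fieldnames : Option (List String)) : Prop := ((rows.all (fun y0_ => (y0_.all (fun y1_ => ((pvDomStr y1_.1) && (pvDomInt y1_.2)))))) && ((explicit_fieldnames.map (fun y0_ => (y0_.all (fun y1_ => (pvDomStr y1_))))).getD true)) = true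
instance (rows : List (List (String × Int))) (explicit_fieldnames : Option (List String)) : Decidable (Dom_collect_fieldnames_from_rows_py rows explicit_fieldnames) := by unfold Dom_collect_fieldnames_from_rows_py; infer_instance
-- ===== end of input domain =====

-- B replaces A's seen-set/ordered-accumulator pass by three staged passes: flatten all keys, a backward overwrite pass recording each key's first index, then a positional filter keeping first occurrences — a different decomposition of the same result, not faster.


-- ===== PORT A =====
-- Port of A: the seen-set / ordered-list loop, transliterated (state = (ordered, seen)).
def collect_fieldnames_from_rows_py (rows : List (List (String × Int))) (explicit_fieldnames : Option (List String)) : List String :=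
  match explicit_fieldnames with
  | some fs => fs
  | none =>
    (rows.foldl (fun st row =>
        row.foldl (fun (st : List String × PySem.Set String) kv =>
          if PySem.Set.contains st.2 kv.1 then st
          else (st.1 ++ [kv.1], PySem.Set.add st.2 kv.1)) st)
      ([], PySem.Set.empty)).1

-- ===== PORT B =====
-- Port of B: keys = flattened row keys; first = dict built by overwriting over reversed(list(enumerate(keys)));
-- result = [key for i, key in enumerate(keys) if first[key] == i].
-- (first[key] is ported as get? compared with some i: the key is always present, so KeyError is unreachable.)
def collect_fieldnames_from_rows_py_alt (rows : List (List (String × Int))) (explicit_fieldnames : Option (List String)) : List String :=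
  match explicit_fieldnames with
  | some fs => fs
  | none =>
    let keys := rows.flatMap (fun row => row.map Prod.fst)
    let first := ((PySem.List.enumerate keys).reverse).foldl
        (fun (d : PySem.Dict String Int) p => d.insert p.2 p.1) PySem.Dict.empty
    ((PySem.List.enumerate keys).filter (fun p => first.get? p.2 == some p.1)).map Prod.snd

-- ===== PRECONDITION & SPEC =====
def Spec_collect_fieldnames_from_rows_py (rows : List (List (String × Int))) (explicit_fieldnames : Option (List String)) (out : List String) : Prop := out = collect_fieldnames_from_rows_py_alt rows explicit_fieldnames
instance (rows : List (List (String × Int))) (explicit_fieldnames : Option (List String)) (out : List String) : Decidable (Spec_collect_fieldnames_from_rows_py rows explicit_fieldnames out) := by unfold Spec_collect_fieldnames_from_rows_py; infer_instance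

-- ===== CLAIM (what is proved, stated in full; the proofs are below) =====
def Claim_equal_collect_fieldnames_from_rows_py : Prop := ∀ (rows : List (List (String × Int))) (explicit_fieldnames : Option (List String)), Dom_collect_fieldnames_from_rows_py rows explicit_fieldnames → Spec_collect_fieldnames_from_rows_py rows explicit_fieldnames (collect_fieldnames_from_rows_py rows explicit_fieldnames)

-- ===== LEMMAS AND PROOFS =====

-- A's inner loop on a state whose seen-set equals its ordered list stays that way, and both equal folding Set.add.
theorem pvInner (row : List (String × Int)) (s : List String) :
    row.foldl (fun (st : List String × PySem.Set String) kv =>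
        if PySem.Set.contains st.2 kv.1 then st
        else (st.1 ++ [kv.1], PySem.Set.add st.2 kv.1)) (s, s)
      = ((row.map Prod.fst).foldl PySem.Set.add s, (row.map Prod.fst).foldl PySem.Set.add s) := by
  induction row generalizing s with
  | nil => rfl
  | cons kv rest ih =>
    simp only [List.foldl_cons, List.map_cons]
    by_cases h : PySem.Set.contains s kv.1 = true
    · have hadd : PySem.Set.add s kv.1 = s := by simp [PySem.Set.add, PySem.Set.contains] at h ⊢; simp [h]
      rw [if_pos h, hadd]; exact ih s
    · have hadd : PySem.Set.add s kv.1 = s ++ [kv.1] := by simp [PySem.Set.add, PySem.Set.contains] at h ⊢; simp [h]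
      rw [if_neg h, hadd]; exact ih (s ++ [kv.1])

theorem pvOuter (rows : List (List (String × Int))) (s : List String) :
    (rows.foldl (fun st row =>
        row.foldl (fun (st : List String × PySem.Set String) kv =>
          if PySem.Set.contains st.2 kv.1 then st
          else (st.1 ++ [kv.1], PySem.Set.add st.2 kv.1)) st) (s, s)).1
      = (rows.flatMap (fun row => row.map Prod.fst)).foldl PySem.Set.add s := by
  induction rows generalizing s with
  | nil => rfl
  | cons row rest ih =>
    simp only [List.foldl_cons, List.flatMap_cons, List.foldl_append, pvInner, ih]

-- A fold of overwriting inserts: the lookup is the LAST write, i.e. the first match of the reversed list.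
theorem pvLastWrite (l : List (Int × String)) (d : PySem.Dict String Int) (k : String) :
    (l.foldl (fun d p => d.insert p.2 p.1) d).get? k
      = match l.reverse.find? (fun p => p.2 == k) with
        | some p => some p.1
        | none => d.get? k := by
  induction l using List.reverseRecOn generalizing d with
  | nil => rfl
  | append_singleton l q ih =>
    rw [List.foldl_append, List.foldl_cons, List.foldl_nil, List.reverse_append,
      List.reverse_singleton, List.singleton_append, List.find?_cons]
    by_cases h : q.2 = k
    · simp [h]
    · have hb : (q.2 == k) = false := by simpa using h
      rw [hb]
      rw [PySem.Dict.get?_insert]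
      rw [if_neg (fun hk => h hk.symm)]
      exact ih d

-- The first enumerate pair whose value is k sits at k's first index.
theorem pvFindEnum (xs : List String) (s : Int) (k : String) :
    (PySem.List.enumerate xs s).find? (fun p => p.2 == k)
      = if k ∈ xs then some (s + (xs.idxOf k : Int), k) else none := by
  induction xs generalizing s with
  | nil => simp [PySem.List.enumerate_nil]
  | cons x xs ih =>
    rw [PySem.List.enumerate_cons, List.find?_cons]
    by_cases h : x = k
    · subst h
      simp [List.idxOf_cons_self]
    · have hb : (x == k) = false := by simpa using h
      have hkx : ¬ k = x := fun hk => h hk.symm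
      rw [hb, ih (s + 1)]
      by_cases hmem : k ∈ xs
      · rw [if_pos hmem, if_pos (List.mem_cons_of_mem _ hmem)]
        have hidx : (x :: xs).idxOf k = (xs.idxOf k).succ := List.idxOf_cons_ne _ h
        rw [hidx]
        have harith : (s + 1) + ((xs.idxOf k : Nat) : Int) = s + (((xs.idxOf k).succ : Nat) : Int) := by
          push_cast; ring
        rw [harith]
      · rw [if_neg hmem, if_neg (by simp [List.mem_cons, hkx, hmem])]

-- B's positional first-occurrence filter computes Set.ofList (right-to-left induction).
theorem pvPositional (keys : List String) :
    ((PySem.List.enumerate keys).filter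
        (fun p => ((keys.idxOf p.2 : Int) == p.1))).map Prod.snd
      = PySem.Set.ofList keys := by
  induction keys using List.reverseRecOn with
  | nil => rfl
  | append_singleton l k ih =>
    rw [PySem.List.enumerate_append, List.filter_append, List.map_append]
    have h1 : (PySem.List.enumerate l 0).filter
        (fun p => (((l ++ [k]).idxOf p.2 : Int) == p.1))
      = (PySem.List.enumerate l 0).filter
        (fun p => ((l.idxOf p.2 : Int) == p.1)) := by
      apply List.filter_congr
      intro p hp
      obtain ⟨j, hj, rfl⟩ := (PySem.List.mem_enumerate_iff _ _ _).1 hp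
      have : (l ++ [k]).idxOf l[j] = l.idxOf l[j] :=
        List.idxOf_append_of_mem (l.getElem_mem hj)
      rw [this]
    rw [h1, ih]
    simp only [zero_add, PySem.List.enumerate, PySem.Set.ofList_append_singleton]
    by_cases hk : k ∈ l
    · have hlt : l.idxOf k < l.length := List.idxOf_lt_length_of_mem hk
      have hne : (((l ++ [k]).idxOf k : Int) == (l.length : Int)) = false := by
        rw [List.idxOf_append_of_mem hk]
        simp only [beq_eq_false_iff_ne, ne_eq, Int.natCast_inj]
        omega
      simp [hne, PySem.Set.add, PySem.Set.contains, PySem.Set.mem_ofList, hk]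
    · have heq : (((l ++ [k]).idxOf k : Int) == (l.length : Int)) = true := by
        have : (l ++ [k]).idxOf k = l.length + [k].idxOf k := List.idxOf_append_of_notMem hk
        simp [this, List.idxOf_cons_self]
      simp [heq, PySem.Set.add, PySem.Set.contains, PySem.Set.mem_ofList, hk]

-- ===== VERDICT (by name: the statement is the Claim_ definition above) =====
theorem collect_fieldnames_from_rows_py_spec : Claim_equal_collect_fieldnames_from_rows_py := by
  intro rows ef _
  unfold Spec_collect_fieldnames_from_rows_py collect_fieldnames_from_rows_py collect_fieldnames_from_rows_py_alt
  cases ef with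
  | some fs => rfl
  | none =>
    simp only []
    set keys := rows.flatMap (fun row => row.map Prod.fst) with hkeys
    have hfilter : ((PySem.List.enumerate keys).filter
        (fun p => (((PySem.List.enumerate keys).reverse.foldl
            (fun (d : PySem.Dict String Int) p => d.insert p.2 p.1) PySem.Dict.empty).get? p.2
          == some p.1)))
      = ((PySem.List.enumerate keys).filter (fun p => ((keys.idxOf p.2 : Int) == p.1))) := by
      apply List.filter_congr
      intro p hp
      obtain ⟨j, hj, rfl⟩ := (PySem.List.mem_enumerate_iff _ _ _).1 hp
      rw [pvLastWrite, List.reverse_reverse, pvFindEnum]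
      rw [if_pos (keys.getElem_mem hj)]
      simp
    calc (rows.foldl (fun st row =>
          row.foldl (fun (st : List String × PySem.Set String) kv =>
            if PySem.Set.contains st.2 kv.1 then st
            else (st.1 ++ [kv.1], PySem.Set.add st.2 kv.1)) st) ([], PySem.Set.empty)).1
        = keys.foldl PySem.Set.add [] := pvOuter rows []
      _ = PySem.Set.ofList keys := (PySem.Set.ofList_eq_foldl keys).symm
      _ = ((PySem.List.enumerate keys).filter
            (fun p => ((keys.idxOf p.2 : Int) == p.1))).map Prod.snd := (pvPositional keys).symm
      _ = _ := by rw [← hfilter]
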